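-- pv_equiv track=rewrite | github.com/dkrivoshapova/aaa_csv | main.py | get_command_hierarchy
-- ===== SOURCE A (Python) =====
-- def get_command_hierarchy(data: list) -> dict[str, list]:
--     '''Form a hierarchy of departments'''
--     hierarchy: dict[str, list] = {}
--     for i in range(1, len(data)):
--         if data[i][1] in hierarchy:
--             hierarchy[data[i][1]].append(data[i][2])
--         else:
--             hierarchy[data[i][1]] = [data[i][2]]
--     return hierarchy
-- ===== SOURCE B (Python) =====
-- def get_command_hierarchy(data: list) -> dict[str, list]:
--     '''Form a hierarchy of departments'''
--     rows = data[1:]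
--     keys = list(dict.fromkeys(r[1] for r in rows))
--     return {k: [r[2] for r in rows if r[1] == k] for k in keys}
-- ===== Notes on version B (the rewrite author's own statement) =====
-- stated objective: alternative
-- what changed: Replaced the single index loop that mutates a dict entry by entry with a two-pass comprehension: first the distinct departments in first-seen order (dict.fromkeys), then one filtered comprehension per department.
import Mathlib
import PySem

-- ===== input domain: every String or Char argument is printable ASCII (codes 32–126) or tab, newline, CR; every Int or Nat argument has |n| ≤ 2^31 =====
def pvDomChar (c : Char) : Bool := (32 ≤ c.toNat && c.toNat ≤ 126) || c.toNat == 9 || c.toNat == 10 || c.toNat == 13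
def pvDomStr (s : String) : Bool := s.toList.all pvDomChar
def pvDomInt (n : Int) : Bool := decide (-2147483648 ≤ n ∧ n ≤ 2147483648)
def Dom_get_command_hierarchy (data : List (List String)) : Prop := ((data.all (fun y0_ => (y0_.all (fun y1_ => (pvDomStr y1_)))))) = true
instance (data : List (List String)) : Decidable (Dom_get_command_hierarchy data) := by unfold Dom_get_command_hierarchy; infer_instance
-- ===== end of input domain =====

-- B replaces A's index loop mutating a dict with a two-pass comprehension (distinct
-- departments in first-seen order, then one filtered pass per department); objective: alternative.

-- ===== PORT A =====
def get_command_hierarchy (data : List (List String)) : List (String × List String) :=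
  ((PySem.List.pyRange 1 data.length 1).foldl
    (fun h i =>
      let row := PySem.List.pyGetD data i []
      if h.contains (PySem.List.pyGetD row 1 "") then
        h.modify (PySem.List.pyGetD row 1 "") [] (fun vs => vs ++ [PySem.List.pyGetD row 2 ""])
      else
        h.insert (PySem.List.pyGetD row 1 "") [PySem.List.pyGetD row 2 ""])
    PySem.Dict.empty).items

-- ===== PORT B =====
def get_command_hierarchy_alt (data : List (List String)) : List (String × List String) :=
  let rows := PySem.List.slice data (some 1) none
  let keys := PySem.List.dedup (rows.map (fun r => PySem.List.pyGetD r 1 ""))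
  keys.map (fun k =>
    (k, (rows.filter (fun r => PySem.List.pyGetD r 1 "" == k)).map
          (fun r => PySem.List.pyGetD r 2 "")))

-- ===== PRECONDITION & SPEC =====
-- Pre_: A raises IndexError when some row after the header has fewer than 3 entries
-- (data[i][1] or data[i][2] out of range); exactly those inputs are excluded.
def Pre_get_command_hierarchy (data : List (List String)) : Prop :=
  ∀ r ∈ data.drop 1, 3 ≤ r.length
instance (data : List (List String)) : Decidable (Pre_get_command_hierarchy data) := by
  unfold Pre_get_command_hierarchy; infer_instance

def pvWitness_get_command_hierarchy : List (List String) :=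
  [["id", "dept", "name"], ["1", "HR", "Ann"], ["2", "IT", "Bob"], ["3", "HR", "Cal"]]

def Spec_get_command_hierarchy (data : List (List String)) (out : List (String × List String)) : Prop := out = get_command_hierarchy_alt data
instance (data : List (List String)) (out : List (String × List String)) : Decidable (Spec_get_command_hierarchy data out) := by unfold Spec_get_command_hierarchy; infer_instance

-- ===== CLAIM (what is proved, stated in full; the proofs are below) =====
def Claim_equal_get_command_hierarchy : Prop := ∀ (data : List (List String)), Dom_get_command_hierarchy data → Pre_get_command_hierarchy data → Spec_get_command_hierarchy data (get_command_hierarchy data)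

-- ===== LEMMAS AND PROOFS =====

-- A's loop body is exactly 'modify key [] (append value)'
theorem pv_step_eq_modify (h : PySem.Dict String (List String)) (row : List String) :
    (if h.contains (PySem.List.pyGetD row 1 "") then
        h.modify (PySem.List.pyGetD row 1 "") [] (fun vs => vs ++ [PySem.List.pyGetD row 2 ""])
      else
        h.insert (PySem.List.pyGetD row 1 "") [PySem.List.pyGetD row 2 ""]) =
    h.modify (PySem.List.pyGetD row 1 "") [] (fun vs => vs ++ [PySem.List.pyGetD row 2 ""]) := by
  split_ifs with hc
  · rfl
  · simp [PySem.Dict.modify,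
      PySem.Dict.getD_of_not_contains _ _ (by simpa using hc)]

-- the row fold in pair form (so the PySem grouping lemmas apply)
theorem pv_foldl_pair (rows : List (List String)) (d : PySem.Dict String (List String)) :
    List.foldl
      (fun (d : PySem.Dict String (List String)) (r : List String) =>
        d.modify (PySem.List.pyGetD r 1 "") [] fun vs => vs ++ [PySem.List.pyGetD r 2 ""])
      d rows =
    List.foldl (fun d p => d.modify p.1 [] fun x => x ++ [p.2]) d
      (rows.map (fun r => (PySem.List.pyGetD r 1 "", PySem.List.pyGetD r 2 ""))) := by
  induction rows generalizing d with
  | nil => rfl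
  | cons r rs ih => simp [ih]

theorem get_command_hierarchy_spec : Claim_equal_get_command_hierarchy := by
  intro data _ _
  unfold Spec_get_command_hierarchy get_command_hierarchy get_command_hierarchy_alt
  rw [PySem.List.foldl_pyRange_pyGetD' data []
        (fun h row =>
          if h.contains (PySem.List.pyGetD row 1 "") then
            h.modify (PySem.List.pyGetD row 1 "") [] (fun vs => vs ++ [PySem.List.pyGetD row 2 ""])
          else
            h.insert (PySem.List.pyGetD row 1 "") [PySem.List.pyGetD row 2 ""])
        PySem.Dict.empty (by norm_num)]
  simp only [pv_step_eq_modify, PySem.List.slice_from data (by norm_num : (0:Int) ≤ 1)]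
  rw [pv_foldl_pair]
  rw [PySem.Dict.items_eq_map_keys _
        (PySem.Dict.nodup_keys_foldl_modify_key _ Prod.fst [] _ _ (by simp)) []]
  rw [PySem.Dict.keys_foldl_modify_key]
  simp [PySem.Dict.getD_foldl_modify_append, List.map_map, Function.comp_def]
  simp only [PySem.Set.update_nil_left, ← List.map_tail]
  refine List.map_congr_left (fun k hk => ?_)
  rw [List.filter_map, List.map_map]
  rfl
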